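-- pv_equiv track=rewrite | github.com/kingkillery/context-1-data-gen | agentic_search_data_gen/domains/web/verify.py | build_failure_reasons
-- ===== SOURCE A (Python) =====
-- from typing import Dict, Any, List, Tuple
--
-- def build_failure_reasons(
--
--     quotes_verified: bool,
--     truth_contained: bool,
--     verification_results: List[Dict[str, bool]] = None,
--     bridging_verification: Dict[str, bool] = None,
--     has_not_relevant_items: bool = False,
--     has_bridging_not_relevant: bool = False,
--     custom_reason: str = None
-- ) -> List[str]:
--     """Build a list of reasons explaining why verification failed."""
--     reasons = []
--
--     if custom_reason:
--         reasons.append(custom_reason)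
--         return reasons
--
--     if has_not_relevant_items:
--         reasons.append("Model indicated supporting item content is not relevant to the clues")
--
--     if has_bridging_not_relevant:
--         reasons.append("Model indicated bridging item content is not relevant")
--
--     if not quotes_verified and verification_results:
--         for i, result in enumerate(verification_results):
--             item_reasons = []
--             if not result.get('clue_quotes_valid', True):
--                 item_reasons.append("clue quotes not found in clues text")
--             if not result.get('item_quotes_valid', True):
--                 item_reasons.append("item quotes not found in page content")
--             if not result.get('truth_quotes_valid', True):
--                 item_reasons.append("truth quotes not found in page content")
--             if item_reasons:
--                 reasons.append(f"Supporting item {i+1}: {', '.join(item_reasons)}")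
--
--     if not quotes_verified and bridging_verification:
--         bridging_reasons = []
--         if not bridging_verification.get('item_clue_quotes_valid', True):
--             bridging_reasons.append("bridging item clue quotes not found in clues")
--         if not bridging_verification.get('item_quotes_valid', True):
--             bridging_reasons.append("bridging item quotes not found in page content")
--         if not bridging_verification.get('prev_item_clue_quotes_valid', True):
--             bridging_reasons.append("previous item clue quotes not found in previous clues")
--         if not bridging_verification.get('prev_item_quotes_valid', True):
--             bridging_reasons.append("previous item quotes not found in previous page content")
--         if bridging_reasons:
--             reasons.append(f"Bridging item: {', '.join(bridging_reasons)}")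
--
--     if not truth_contained:
--         reasons.append("No supporting item contains verifiable truth quotes")
--
--     return reasons
-- ===== SOURCE B (Python) =====
-- _ITEM_CHECKS = (
--     ("clue_quotes_valid", "clue quotes not found in clues text"),
--     ("item_quotes_valid", "item quotes not found in page content"),
--     ("truth_quotes_valid", "truth quotes not found in page content"),
-- )
--
-- _BRIDGING_CHECKS = (
--     ("item_clue_quotes_valid", "bridging item clue quotes not found in clues"),
--     ("item_quotes_valid", "bridging item quotes not found in page content"),
--     ("prev_item_clue_quotes_valid", "previous item clue quotes not found in previous clues"),
--     ("prev_item_quotes_valid", "previous item quotes not found in previous page content"),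
-- )
--
--
-- def build_failure_reasons(
--     quotes_verified: bool,
--     truth_contained: bool,
--     verification_results=None,
--     bridging_verification=None,
--     has_not_relevant_items: bool = False,
--     has_bridging_not_relevant: bool = False,
--     custom_reason: str = None,
-- ):
--     """Build a list of reasons explaining why verification failed."""
--     if custom_reason:
--         return [custom_reason]
--
--     # Stage 1: collect every quote-check group uniformly as (label, flags_dict, check_table).
--     groups = []
--     if not quotes_verified:
--         for i, result in enumerate(verification_results or ()):
--             groups.append((f"Supporting item {i + 1}", result, _ITEM_CHECKS))
--         if bridging_verification:
--             groups.append(("Bridging item", bridging_verification, _BRIDGING_CHECKS))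
--
--     # Stage 2: one generic renderer turns each failing group into its line.
--     quote_lines = [
--         f"{label}: {', '.join(msgs)}"
--         for label, flags, checks in groups
--         if (msgs := [m for k, m in checks if not flags.get(k, True)])
--     ]
--
--     # Stage 3: assemble the sections.
--     head = [
--         m
--         for flag, m in (
--             (has_not_relevant_items, "Model indicated supporting item content is not relevant to the clues"),
--             (has_bridging_not_relevant, "Model indicated bridging item content is not relevant"),
--         )
--         if flag
--     ]
--     tail = [] if truth_contained else ["No supporting item contains verifiable truth quotes"]
--     return head + quote_lines + tail
-- ===== Notes on version B (the rewrite author's own statement) =====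
-- stated objective: alternative
-- what changed: A interleaves conditional appends into one mutated accumulator with two separate hand-written check blocks (per-item loop and bridging); B is a staged pipeline that first collects all quote checks uniformly as (label, flags, check-table) groups, then renders every group with one generic renderer, then concatenates head/quote/tail sections.
import Mathlib
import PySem

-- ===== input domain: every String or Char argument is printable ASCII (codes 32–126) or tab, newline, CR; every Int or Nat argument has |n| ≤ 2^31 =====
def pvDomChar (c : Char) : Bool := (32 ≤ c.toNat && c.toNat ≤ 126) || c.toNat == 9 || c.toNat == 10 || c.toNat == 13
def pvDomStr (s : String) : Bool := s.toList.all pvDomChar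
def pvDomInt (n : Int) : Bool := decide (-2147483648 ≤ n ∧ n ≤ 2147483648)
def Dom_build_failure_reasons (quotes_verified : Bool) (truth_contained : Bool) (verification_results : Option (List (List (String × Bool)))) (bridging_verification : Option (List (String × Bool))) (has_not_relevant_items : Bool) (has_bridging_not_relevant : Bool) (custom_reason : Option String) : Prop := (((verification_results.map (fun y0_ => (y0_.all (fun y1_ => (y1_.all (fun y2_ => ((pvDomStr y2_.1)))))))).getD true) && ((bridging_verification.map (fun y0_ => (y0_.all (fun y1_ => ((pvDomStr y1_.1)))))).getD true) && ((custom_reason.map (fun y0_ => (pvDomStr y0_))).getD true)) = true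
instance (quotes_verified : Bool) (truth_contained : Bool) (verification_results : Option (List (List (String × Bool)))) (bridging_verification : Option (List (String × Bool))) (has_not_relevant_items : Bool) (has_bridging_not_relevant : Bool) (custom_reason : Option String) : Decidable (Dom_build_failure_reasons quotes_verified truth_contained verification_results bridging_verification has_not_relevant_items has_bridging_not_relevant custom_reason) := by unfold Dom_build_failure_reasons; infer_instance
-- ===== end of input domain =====

-- ===== PORT A =====
-- B replaces A's interleaved conditional appends and two hand-written check blocks with a staged
-- pipeline (collect uniform labelled check groups, render them with one generic renderer,
-- concatenate head/quote/tail sections); same results, objective 'alternative'.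
-- dicts are assoc lists via PySem.Dict (dict.get(key, True) = getD, first match).
def build_failure_reasons (quotes_verified : Bool) (truth_contained : Bool) (verification_results : Option (List (List (String × Bool)))) (bridging_verification : Option (List (String × Bool))) (has_not_relevant_items : Bool) (has_bridging_not_relevant : Bool) (custom_reason : Option String) : List String :=
  let reasons : List String := []
  -- `if custom_reason:` — truthy iff a non-empty string
  if !(custom_reason.getD "" == "") then
    reasons ++ [custom_reason.getD ""]
  else
    let reasons := if has_not_relevant_items then reasons ++ ["Model indicated supporting item content is not relevant to the clues"] else reasons
    let reasons := if has_bridging_not_relevant then reasons ++ ["Model indicated bridging item content is not relevant"] else reasons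
    let reasons :=
      if !quotes_verified && !(verification_results.getD []).isEmpty then
        (PySem.List.enumerate (verification_results.getD []) 0).foldl (fun acc ir =>
          let result := PySem.Dict.mk ir.2
          -- item_reasons: the three conditional appends, written as one concatenation
          let item_reasons : List String :=
            (if !(result.getD "clue_quotes_valid" true) then ["clue quotes not found in clues text"] else []) ++
            (if !(result.getD "item_quotes_valid" true) then ["item quotes not found in page content"] else []) ++
            (if !(result.getD "truth_quotes_valid" true) then ["truth quotes not found in page content"] else [])
          if !item_reasons.isEmpty then
            acc ++ ["Supporting item " ++ PySem.Int.toStr (ir.1 + 1) ++ ": " ++ PySem.Str.join ", " item_reasons]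
          else acc) reasons
      else reasons
    let reasons :=
      if !quotes_verified && !(bridging_verification.getD []).isEmpty then
        let b := PySem.Dict.mk (bridging_verification.getD [])
        -- bridging_reasons: the four conditional appends, written as one concatenation
        let bridging_reasons : List String :=
          (if !(b.getD "item_clue_quotes_valid" true) then ["bridging item clue quotes not found in clues"] else []) ++
          (if !(b.getD "item_quotes_valid" true) then ["bridging item quotes not found in page content"] else []) ++
          (if !(b.getD "prev_item_clue_quotes_valid" true) then ["previous item clue quotes not found in previous clues"] else []) ++
          (if !(b.getD "prev_item_quotes_valid" true) then ["previous item quotes not found in previous page content"] else [])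
        if !bridging_reasons.isEmpty then
          reasons ++ ["Bridging item: " ++ PySem.Str.join ", " bridging_reasons]
        else reasons
      else reasons
    let reasons := if !truth_contained then reasons ++ ["No supporting item contains verifiable truth quotes"] else reasons
    reasons

-- ===== PORT B =====
def bfrItemChecks : List (String × String) :=
  [("clue_quotes_valid", "clue quotes not found in clues text"),
   ("item_quotes_valid", "item quotes not found in page content"),
   ("truth_quotes_valid", "truth quotes not found in page content")]

def bfrBridgingChecks : List (String × String) :=
  [("item_clue_quotes_valid", "bridging item clue quotes not found in clues"),
   ("item_quotes_valid", "bridging item quotes not found in page content"),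
   ("prev_item_clue_quotes_valid", "previous item clue quotes not found in previous clues"),
   ("prev_item_quotes_valid", "previous item quotes not found in previous page content")]

-- Stage 1: every quote-check group, uniformly, as (label, flags, check table)
def bfrGroups (quotes_verified : Bool) (verification_results : Option (List (List (String × Bool)))) (bridging_verification : Option (List (String × Bool))) : List (String × List (String × Bool) × List (String × String)) :=
  if !quotes_verified then
    ((PySem.List.enumerate (verification_results.getD []) 0).map
      (fun ir => ("Supporting item " ++ PySem.Int.toStr (ir.1 + 1), ir.2, bfrItemChecks)))
    ++ (if !(bridging_verification.getD []).isEmpty then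
          [("Bridging item", bridging_verification.getD [], bfrBridgingChecks)]
        else [])
  else []

-- Stage 2: one generic renderer for every group
def bfrRender (groups : List (String × List (String × Bool) × List (String × String))) : List String :=
  groups.filterMap (fun g =>
    let msgs := g.2.2.filterMap (fun c => if (PySem.Dict.mk g.2.1).getD c.1 true then none else some c.2)
    if !msgs.isEmpty then some (g.1 ++ ": " ++ PySem.Str.join ", " msgs) else none)

def build_failure_reasons_alt (quotes_verified : Bool) (truth_contained : Bool) (verification_results : Option (List (List (String × Bool)))) (bridging_verification : Option (List (String × Bool))) (has_not_relevant_items : Bool) (has_bridging_not_relevant : Bool) (custom_reason : Option String) : List String :=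
  if !(custom_reason.getD "" == "") then
    [custom_reason.getD ""]
  else
    let quote_lines := bfrRender (bfrGroups quotes_verified verification_results bridging_verification)
    -- Stage 3: assemble the sections
    let head := [(has_not_relevant_items, "Model indicated supporting item content is not relevant to the clues"),
                 (has_bridging_not_relevant, "Model indicated bridging item content is not relevant")].filterMap
                  (fun p => if p.1 then some p.2 else none)
    let tail := if truth_contained then [] else ["No supporting item contains verifiable truth quotes"]
    head ++ quote_lines ++ tail

-- ===== PRECONDITION & SPEC =====
def Spec_build_failure_reasons (quotes_verified : Bool) (truth_contained : Bool) (verification_results : Option (List (List (String × Bool)))) (bridging_verification : Option (List (String × Bool))) (has_not_relevant_items : Bool) (has_bridging_not_relevant : Bool) (custom_reason : Option String) (out : List String) : Prop := out = build_failure_reasons_alt quotes_verified truth_contained verification_results bridging_verification has_not_relevant_items has_bridging_not_relevant custom_reason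
instance (quotes_verified : Bool) (truth_contained : Bool) (verification_results : Option (List (List (String × Bool)))) (bridging_verification : Option (List (String × Bool))) (has_not_relevant_items : Bool) (has_bridging_not_relevant : Bool) (custom_reason : Option String) (out : List String) : Decidable (Spec_build_failure_reasons quotes_verified truth_contained verification_results bridging_verification has_not_relevant_items has_bridging_not_relevant custom_reason out) := by unfold Spec_build_failure_reasons; infer_instance

-- ===== CLAIM (what is proved, stated in full; the proofs are below) =====
def Claim_equal_build_failure_reasons : Prop := ∀ (quotes_verified : Bool) (truth_contained : Bool) (verification_results : Option (List (List (String × Bool)))) (bridging_verification : Option (List (String × Bool))) (has_not_relevant_items : Bool) (has_bridging_not_relevant : Bool) (custom_reason : Option String), Dom_build_failure_reasons quotes_verified truth_contained verification_results bridging_verification has_not_relevant_items has_bridging_not_relevant custom_reason → Spec_build_failure_reasons quotes_verified truth_contained verification_results bridging_verification has_not_relevant_items has_bridging_not_relevant custom_reason (build_failure_reasons quotes_verified truth_contained verification_results bridging_verification has_not_relevant_items has_bridging_not_relevant custom_reason)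

-- ===== LEMMAS AND PROOFS =====
-- B-side shorthand used only by the proofs: the msgs a group's check table yields
def bfrFailed (result : List (String × Bool)) (checks : List (String × String)) : List String :=
  checks.filterMap (fun c => if (PySem.Dict.mk result).getD c.1 true then none else some c.2)

theorem bfr_item (r : List (String × Bool)) :
    ((if !((PySem.Dict.mk r).getD "clue_quotes_valid" true) then ["clue quotes not found in clues text"] else []) ++
     (if !((PySem.Dict.mk r).getD "item_quotes_valid" true) then ["item quotes not found in page content"] else []) ++
     (if !((PySem.Dict.mk r).getD "truth_quotes_valid" true) then ["truth quotes not found in page content"] else []))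
      = bfrFailed r bfrItemChecks := by
  cases h1 : (PySem.Dict.mk r).getD "clue_quotes_valid" true <;>
  cases h2 : (PySem.Dict.mk r).getD "item_quotes_valid" true <;>
  cases h3 : (PySem.Dict.mk r).getD "truth_quotes_valid" true <;>
  simp [bfrFailed, bfrItemChecks, h1, h2, h3]

theorem bfr_bridge (r : List (String × Bool)) :
    ((if !((PySem.Dict.mk r).getD "item_clue_quotes_valid" true) then ["bridging item clue quotes not found in clues"] else []) ++
     (if !((PySem.Dict.mk r).getD "item_quotes_valid" true) then ["bridging item quotes not found in page content"] else []) ++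
     (if !((PySem.Dict.mk r).getD "prev_item_clue_quotes_valid" true) then ["previous item clue quotes not found in previous clues"] else []) ++
     (if !((PySem.Dict.mk r).getD "prev_item_quotes_valid" true) then ["previous item quotes not found in previous page content"] else []))
      = bfrFailed r bfrBridgingChecks := by
  cases h1 : (PySem.Dict.mk r).getD "item_clue_quotes_valid" true <;>
  cases h2 : (PySem.Dict.mk r).getD "item_quotes_valid" true <;>
  cases h3 : (PySem.Dict.mk r).getD "prev_item_clue_quotes_valid" true <;>
  cases h4 : (PySem.Dict.mk r).getD "prev_item_quotes_valid" true <;>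
  simp [bfrFailed, bfrBridgingChecks, h1, h2, h3, h4]

theorem bfr_fold (l : List (Int × List (String × Bool))) (acc : List String) :
    l.foldl (fun acc ir =>
          let result := PySem.Dict.mk ir.2
          let item_reasons : List String :=
            (if !(result.getD "clue_quotes_valid" true) then ["clue quotes not found in clues text"] else []) ++
            (if !(result.getD "item_quotes_valid" true) then ["item quotes not found in page content"] else []) ++
            (if !(result.getD "truth_quotes_valid" true) then ["truth quotes not found in page content"] else [])
          if !item_reasons.isEmpty then
            acc ++ ["Supporting item " ++ PySem.Int.toStr (ir.1 + 1) ++ ": " ++ PySem.Str.join ", " item_reasons]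
          else acc) acc
      = acc ++ l.filterMap (fun ir =>
          let msgs := bfrFailed ir.2 bfrItemChecks
          if !msgs.isEmpty then
            some ("Supporting item " ++ PySem.Int.toStr (ir.1 + 1) ++ ": " ++ PySem.Str.join ", " msgs)
          else none) := by
  induction l generalizing acc with
  | nil => simp
  | cons p t ih =>
      simp only [List.foldl_cons, List.filterMap_cons]
      rw [ih, bfr_item p.2]
      by_cases h : (bfrFailed p.2 bfrItemChecks).isEmpty = true <;> simp [h]

-- rendering the group list = the item lines followed by the bridging line
theorem bfr_render_groups (qv : Bool) (vr : Option (List (List (String × Bool)))) (bv : Option (List (String × Bool))) :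
    bfrRender (bfrGroups qv vr bv) =
      (if qv then [] else
        (PySem.List.enumerate (vr.getD []) 0).filterMap (fun ir =>
          let msgs := bfrFailed ir.2 bfrItemChecks
          if !msgs.isEmpty then
            some ("Supporting item " ++ PySem.Int.toStr (ir.1 + 1) ++ ": " ++ PySem.Str.join ", " msgs)
          else none))
      ++ (if !qv && !(bv.getD []).isEmpty then
            (let msgs := bfrFailed (bv.getD []) bfrBridgingChecks
             if !msgs.isEmpty then ["Bridging item: " ++ PySem.Str.join ", " msgs] else [])
          else []) := by
  cases qv with
  | true => simp [bfrGroups, bfrRender]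
  | false =>
      simp only [bfrGroups, Bool.not_false, if_pos, Bool.true_and]
      by_cases hb : ((bv.getD []).isEmpty : Bool) = true
      · simp [bfrRender, List.filterMap_append, List.filterMap_map, bfrFailed, hb, Function.comp]
        try rfl
        try (apply List.filterMap_congr; intro x _; rfl)
      · simp only [bfrRender, List.filterMap_append, hb, Bool.not_false, if_pos,
          List.filterMap_cons, List.filterMap_nil, List.filterMap_map, Function.comp]
        congr 1
        by_cases hm : (bfrFailed (bv.getD []) bfrBridgingChecks).isEmpty = true <;>
        simp only [bfrFailed] at hm <;> simp [hm, bfrFailed]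

-- ===== VERDICT (by name: the statement is the Claim_ definition above) =====
set_option maxHeartbeats 1000000 in
theorem build_failure_reasons_spec : Claim_equal_build_failure_reasons := by
  intro qv tc vr bv hnr hbnr cr _
  unfold Spec_build_failure_reasons
  simp only [build_failure_reasons, build_failure_reasons_alt]
  rw [bfr_render_groups, bfr_fold, bfr_bridge]
  cases hc : (cr.getD "" == "") <;>
  cases qv <;>
  cases hnr <;> cases hbnr <;> cases tc <;>
  by_cases h1 : (vr.getD []) = [] <;>
  by_cases h2 : (bv.getD []) = [] <;>
  by_cases hb : (bfrFailed (bv.getD []) bfrBridgingChecks).isEmpty = true <;>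
  simp [hc, h1, h2, hb, PySem.List.enumerate]
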